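-- pv_equiv track=rewrite | github.com/AlectorAlexander/algorithms | challenges/challenge_find_the_duplicate.py | create_count
-- ===== SOURCE A (Python) =====
-- def create_count(nums):
--     counts = {}
--     for num in nums:
--         if isinstance(num, str) or num < 0:
--             return False
--         elif num not in counts:
--             counts[num] = 1
--         else:
--             counts[num] += 1
--     return counts
-- ===== SOURCE B (Python) =====
-- def create_count(nums):
--     # validate first (short-circuit), then count each distinct value directly
--     if any(isinstance(n, str) or n < 0 for n in nums):
--         return False
--     return {v: nums.count(v) for v in dict.fromkeys(nums)}
-- ===== Notes on version B (the rewrite author's own statement) =====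
-- stated objective: alternative
-- what changed: A's single interleaved loop that validates and increments a running dict per element is replaced by a short-circuiting validation pass followed by a per-distinct-value nums.count() scan keyed by first-occurrence order (dict.fromkeys), so no incremental counter state is maintained at all.
-- outside the precondition, e.g. on create_count([3, -1, 3]): A returns False, B returns False
import Mathlib
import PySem

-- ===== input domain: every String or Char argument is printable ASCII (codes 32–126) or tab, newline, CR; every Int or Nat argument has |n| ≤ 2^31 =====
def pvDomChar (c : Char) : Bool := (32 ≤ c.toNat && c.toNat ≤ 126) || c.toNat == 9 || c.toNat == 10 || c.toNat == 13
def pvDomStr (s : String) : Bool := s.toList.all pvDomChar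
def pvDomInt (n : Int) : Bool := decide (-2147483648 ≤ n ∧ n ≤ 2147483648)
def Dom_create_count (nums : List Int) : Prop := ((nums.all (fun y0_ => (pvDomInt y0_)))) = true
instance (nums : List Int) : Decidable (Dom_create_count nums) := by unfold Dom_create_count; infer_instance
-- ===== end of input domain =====

-- B replaces A's interleaved validate-and-increment loop by a validation pass followed
-- by a per-distinct-value count scan (no running counter state); return value only.

-- ===== PORT A =====
-- A's loop: dict state, early return False on a negative element (False is a bool,
-- not a dict, hence outside the declared return type; [] stands in for that
-- branch, which Pre_ excludes).
def create_count_go (nums : List Int) (counts : PySem.Dict Int Int) : List (Int × Int) :=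
  match nums with
  | [] => counts.items
  | num :: rest =>
    if num < 0 then []          -- Python: return False (excluded by Pre_)
    else if counts.contains num = false then
      create_count_go rest (counts.insert num 1)
    else
      create_count_go rest (counts.modify num 0 (· + 1))

def create_count (nums : List Int) : List (Int × Int) :=
  create_count_go nums PySem.Dict.empty

-- ===== PORT B =====
-- {v: nums.count(v) for v in dict.fromkeys(nums)}
def create_count_alt (nums : List Int) : List (Int × Int) :=
  if nums.any (fun n => decide (n < 0)) then []   -- Python: return False (excluded by Pre_)
  else (PySem.List.dedup nums).map (fun v => (v, (nums.count v : Int)))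

-- ===== PRECONDITION & SPEC =====
-- Pre_ excludes lists containing a negative element: there A returns the bool False
-- rather than a dict, a value outside the declared return type List (Int × Int)
-- (B returns the same False in Python, but neither value is expressible here).
def Pre_create_count (nums : List Int) : Prop := (nums.all (fun n => decide (0 ≤ n))) = true
instance (nums : List Int) : Decidable (Pre_create_count nums) := by unfold Pre_create_count; infer_instance
def pvWitness_create_count : List Int := [1, 2, 1, 0]

def Spec_create_count (nums : List Int) (out : List (Int × Int)) : Prop := out = create_count_alt nums
instance (nums : List Int) (out : List (Int × Int)) : Decidable (Spec_create_count nums out) := by unfold Spec_create_count; infer_instance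

-- ===== CLAIM (what is proved, stated in full; the proofs are below) =====
def Claim_equal_create_count : Prop := ∀ (nums : List Int), Dom_create_count nums → Pre_create_count nums → Spec_create_count nums (create_count nums)

-- ===== LEMMAS AND PROOFS =====

-- Both of A's branches perform Python's d[num] = d.get(num, 0) + 1.
theorem create_count_step (d : PySem.Dict Int Int) (num : Int) :
    (if d.contains num = false then d.insert num 1 else d.modify num 0 (· + 1))
      = d.modify num 0 (· + 1) := by
  by_cases h : d.contains num = false
  · simp [h]
    show d.insert num 1 = d.insert num (d.getD num 0 + 1)
    rw [PySem.Dict.getD_of_not_contains d (0 : Int) h]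
    norm_num
  · simp [h]

-- On all-nonnegative input A's loop is the Counter fold.
theorem create_count_go_eq (nums : List Int) (d : PySem.Dict Int Int)
    (h : ∀ n ∈ nums, 0 ≤ n) :
    create_count_go nums d = (nums.foldl (fun d x => d.modify x 0 (· + 1)) d).items := by
  induction nums generalizing d with
  | nil => rfl
  | cons num rest ih =>
    have hnum : ¬ num < 0 := by have := h num (by simp); omega
    have hrest : ∀ n ∈ rest, 0 ≤ n := fun n hn => h n (by simp [hn])
    simp only [create_count_go, if_neg hnum, List.foldl_cons]
    by_cases hc : d.contains num = false
    · rw [if_pos hc, ih _ hrest]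
      have := create_count_step d num
      rw [if_pos hc] at this
      rw [this]
    · rw [if_neg hc, ih _ hrest]

theorem create_count_spec : Claim_equal_create_count := by
  intro nums _ hpre
  have hnn : ∀ n ∈ nums, 0 ≤ n := by
    intro n hn
    have := List.all_eq_true.mp hpre n hn
    simpa using this
  have hno : nums.any (fun n => decide (n < 0)) = false := by
    simp only [List.any_eq_false, decide_eq_true_eq]
    intro n hn
    have := hnn n hn; omega
  show create_count nums = create_count_alt nums
  unfold create_count create_count_alt
  rw [if_neg (by simp [hno]), create_count_go_eq nums PySem.Dict.empty hnn,
      ← PySem.Dict.counter_eq_foldl, PySem.Dict.items_counter,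
      PySem.List.dedup_eq_ofList]
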